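-- pv_equiv track=rewrite | github.com/artkpv/code-dojo | yandex.ru/2024_yandex_cup/E/pr.py | solve
-- ===== SOURCE A (Python) =====
-- import math
--
-- def solve(n, arr):
--     ans = 0
--     arr = sorted(arr)
--
--     dp = {0:1}
--     def rec(n):
--         if n not in dp:
--             dp[n] = 0
--             for p in range(math.floor(math.log2(n))+1):
--                 for v in arr:
--                     if 2**p * v <= n:
--                         dp[n] += rec(n - 2**p * v)
--
--         return dp[n]
--
--     return rec(n)
-- ===== SOURCE B (Python) =====
-- def solve(n, arr):
--     # Bottom-up DP over 0..n instead of A's memoized recursion.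
--     dp = [0] * (n + 1)
--     dp[0] = 1
--     for m in range(1, n + 1):
--         for p in range(m.bit_length()):
--             w = 1 << p
--             for v in arr:
--                 c = w * v
--                 if c <= m:
--                     dp[m] += dp[m - c]
--     return dp[n]
-- ===== Notes on version B (the rewrite author's own statement) =====
-- stated objective: alternative
-- what changed: Replaced A's memoized top-down recursion (a dict-backed recursive rec(n)) by an explicit bottom-up DP table dp[0..n] filled in increasing order, which also avoids Python's recursion-depth limit.
-- outside the precondition, e.g. on solve(3, [6, 3, 1, 0]): A returns 9, B returns 48; on solve(-2, [1]): A raises ValueError, B raises IndexError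
import Mathlib
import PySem

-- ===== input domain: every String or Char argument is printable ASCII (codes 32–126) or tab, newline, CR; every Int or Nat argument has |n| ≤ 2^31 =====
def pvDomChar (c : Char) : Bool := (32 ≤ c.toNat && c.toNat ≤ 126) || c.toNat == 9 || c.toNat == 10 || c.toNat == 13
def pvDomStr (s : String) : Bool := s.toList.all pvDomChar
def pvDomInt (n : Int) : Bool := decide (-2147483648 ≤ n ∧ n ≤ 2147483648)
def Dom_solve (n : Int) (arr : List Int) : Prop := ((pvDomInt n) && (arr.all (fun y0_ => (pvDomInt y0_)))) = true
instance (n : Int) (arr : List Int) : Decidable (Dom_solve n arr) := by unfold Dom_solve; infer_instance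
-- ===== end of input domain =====

-- B replaces A's memoized top-down recursion by a bottom-up DP table filled in increasing order
-- (objective: alternative decomposition). A raises RecursionError on deeply recursive inputs; the
-- equivalence claimed here is about the inputs where A returns or where only the interpreter's
-- stack limit stops it (the port of A is the same computation with enough fuel).

-- ===== PORT A =====
-- A's inner helper `rec`, with the memo dict threaded through; `fuel` bounds the recursion depth.
-- fuel = n+1 is always enough for the recursion itself (each call strictly decreases n when all
-- coins are ≥ 1, as Pre_solve requires), so the fuel-0 branch is unreachable under Pre_solve;
-- CPython instead aborts with RecursionError when the depth n/min(arr) passes its stack limit —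
-- an interpreter resource limit, not part of the algorithm, so the port does not model it.
-- math.floor(math.log2(m)) is exactly Nat.log2 m.toNat for 1 ≤ m ≤ 2^31 (the Dom_solve range).
def recA (arr : List Int) : Nat → PySem.Dict Int Int → Int → Int × PySem.Dict Int Int
  | 0, dp, _ => (0, dp)                 -- fuel exhausted: unreachable under Pre_solve
  | fuel+1, dp, m =>
    match dp.get? m with
    | some val => (val, dp)             -- `if n not in dp` memo hit
    | none =>
      let dp1 := dp.insert m 0          -- dp[n] = 0
      let dp2 := (List.range (m.toNat.log2 + 1)).foldl (fun d p =>
        arr.foldl (fun d v =>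
          if 2 ^ p * v ≤ m then
            let old := d.getD m 0
            let r := recA arr fuel d (m - 2 ^ p * v)
            r.2.insert m (old + r.1)    -- dp[n] += rec(n - 2**p * v)
          else d) d) dp1
      (dp2.getD m 0, dp2)

def solve (n : Int) (arr : List Int) : Int :=
  let arr := PySem.List.sorted arr (fun x => x) false    -- arr = sorted(arr)
  if n < 0 then 0                       -- math.log2 of a negative raises ValueError (outside Pre_solve)
  else (recA arr (n.toNat + 1) ((PySem.Dict.empty).insert 0 1) n).1   -- dp = {0:1}; return rec(n)

-- ===== PORT B =====
-- bottom-up: dp = [0]*(n+1); dp[0] = 1; fill dp[1..n] in increasing order.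
-- m.bit_length() = Nat.size m; Python's dp[i] reads/writes are in range under Pre_solve,
-- so List.getD/List.set are exact there.
def solve_alt (n : Int) (arr : List Int) : Int :=
  if n < 0 then 0                       -- Python: dp[0] = 1 on the empty list raises IndexError (outside Pre_solve)
  else
    let N := n.toNat
    let dp0 := (List.replicate (N + 1) (0 : Int)).set 0 1
    let dp := (List.range' 1 N).foldl (fun dp m =>
      (List.range (Nat.size m)).foldl (fun dp p =>
        arr.foldl (fun dp v =>
          if 2 ^ p * v ≤ (m : Int) then
            dp.set m (dp.getD m 0 + dp.getD ((m : Int) - 2 ^ p * v).toNat 0)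
          else dp) dp) dp) dp0
    dp.getD N 0

-- ===== PRECONDITION & SPEC =====
-- Pre_solve excludes: n < 0, where A raises ValueError (math.log2 of a negative); arr elements
-- = 0, where both programs read dp[m] while it still holds a mid-loop partial sum, so each returns
-- an accidental, iteration-order-dependent value no one would specify (A's also depends on its
-- sort); and negative arr elements, where A's recursion never terminates.
def Pre_solve (n : Int) (arr : List Int) : Prop := 0 ≤ n ∧ ∀ v ∈ arr, 1 ≤ v
instance (n : Int) (arr : List Int) : Decidable (Pre_solve n arr) := by unfold Pre_solve; infer_instance
def pvWitness_solve : Int × List Int := (10, [1, 2])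

def Spec_solve (n : Int) (arr : List Int) (out : Int) : Prop := out = solve_alt n arr
instance (n : Int) (arr : List Int) (out : Int) : Decidable (Spec_solve n arr out) := by unfold Spec_solve; infer_instance

-- ===== CLAIM (what is proved, stated in full; the proofs are below) =====
def Claim_equal_solve : Prop := ∀ (n : Int) (arr : List Int), Dom_solve n arr → Pre_solve n arr → Spec_solve n arr (solve n arr)

-- ===== LEMMAS AND PROOFS =====

-- The mathematical recurrence both programs compute: f 0 = 1,
-- f m = Σ_{p ≤ log2 m} Σ_{v ∈ arr, 1 ≤ 2^p v ≤ m} f (m - 2^p v).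
def fModel (arr : List Int) (m : Nat) : Int :=
  if m = 0 then 1
  else ((List.range (m.log2 + 1)).map (fun p =>
         (arr.map (fun v =>
            if _h : 1 ≤ (2:Int) ^ p * v ∧ (2:Int) ^ p * v ≤ (m : Int)
            then fModel arr (((m : Int) - (2:Int) ^ p * v).toNat)
            else 0)).sum)).sum
termination_by m
decreasing_by omega

lemma fModel_zero (arr : List Int) : fModel arr 0 = 1 := by rw [fModel]; simp

-- the flattened list of coins 2^p * v, p < K, v ∈ arr (the iteration space of the double loop)
def coinList (arr : List Int) (K : Nat) : List Int :=
  (List.range K).flatMap (fun p => arr.map (fun v => (2:Int) ^ p * v))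

-- the sum the inner double loop adds to dp[m]
def T (arr : List Int) (m : Int) (cs : List Int) : Int :=
  (cs.map (fun c => if c ≤ m then fModel arr ((m - c).toNat) else 0)).sum

lemma T_nil (arr : List Int) (m : Int) : T arr m [] = 0 := rfl

lemma T_cons (arr : List Int) (m : Int) (c : Int) (cs : List Int) :
    T arr m (c :: cs) = (if c ≤ m then fModel arr ((m - c).toNat) else 0) + T arr m cs := by
  simp [T]

lemma one_le_coin {p : Nat} {v : Int} (hv : 1 ≤ v) : 1 ≤ (2:Int) ^ p * v := by
  have h2 : (1:Int) ≤ 2 ^ p := one_le_pow₀ (by norm_num)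
  calc (1:Int) ≤ v := hv
    _ = 1 * v := (one_mul v).symm
    _ ≤ 2 ^ p * v := mul_le_mul_of_nonneg_right h2 (le_trans zero_le_one hv)

lemma mem_coinList {arr : List Int} {K : Nat} (hv : ∀ v ∈ arr, 1 ≤ v) :
    ∀ c ∈ coinList arr K, 1 ≤ c := by
  intro c hc
  simp only [coinList, List.mem_flatMap, List.mem_map, List.mem_range] at hc
  obtain ⟨p, -, v, hvmem, rfl⟩ := hc
  exact one_le_coin (hv v hvmem)

-- double foldl over (range K) × arr with a body depending only on 2^p*v = foldl over coinList
lemma foldl_coinList {δ : Type} (K : Nat) (arr : List Int) (g : δ → Int → δ) (init : δ) :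
    (List.range K).foldl (fun d p => arr.foldl (fun d v => g d ((2:Int) ^ p * v)) d) init
      = (coinList arr K).foldl g init := by
  unfold coinList
  generalize List.range K = l
  induction l generalizing init with
  | nil => simp
  | cons p ps ih => simp [List.foldl_map, ih]

-- fModel at m ≠ 0 is the coinList sum (all coins are ≥ 1 when all of arr is)
lemma fModel_eq_T {arr : List Int} (hv : ∀ v ∈ arr, 1 ≤ v) {m : Nat} (hm : m ≠ 0) :
    fModel arr m = T arr (m : Int) (coinList arr (m.log2 + 1)) := by
  rw [fModel, if_neg hm]
  unfold T coinList
  rw [List.map_flatMap]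
  rw [List.flatMap_def, List.sum_flatten, List.map_map]
  apply congrArg List.sum
  apply List.map_congr_left
  intro p _
  simp only [Function.comp, List.map_map]
  apply congrArg List.sum
  apply List.map_congr_left
  intro v hvm
  have h1 : 1 ≤ (2:Int) ^ p * v := one_le_coin (hv v hvm)
  simp only [Function.comp_apply]
  by_cases hc : (2:Int) ^ p * v ≤ (m : Int)
  · rw [dif_pos ⟨h1, hc⟩, if_pos hc]
  · rw [dif_neg (fun h => hc h.2), if_neg hc]

-- fModel only depends on arr up to permutation (sums over arr commute)
lemma fModel_perm {arr arr' : List Int} (hp : arr.Perm arr') (m : Nat) :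
    fModel arr m = fModel arr' m := by
  induction m using Nat.strong_induction_on with
  | _ m ih =>
    by_cases hm : m = 0
    · subst hm; rw [fModel_zero, fModel_zero]
    · rw [fModel, fModel, if_neg hm, if_neg hm]
      apply congrArg List.sum
      apply List.map_congr_left
      intro p _
      have hg : (fun v => if _h : 1 ≤ (2:Int) ^ p * v ∧ (2:Int) ^ p * v ≤ (m : Int)
            then fModel arr (((m : Int) - (2:Int) ^ p * v).toNat) else 0)
          = (fun v => if _h : 1 ≤ (2:Int) ^ p * v ∧ (2:Int) ^ p * v ≤ (m : Int)
            then fModel arr' (((m : Int) - (2:Int) ^ p * v).toNat) else 0) := by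
        funext v
        by_cases h : 1 ≤ (2:Int) ^ p * v ∧ (2:Int) ^ p * v ≤ (m : Int)
        · rw [dif_pos h, dif_pos h]
          exact ih _ (by omega)
        · rw [dif_neg h, dif_neg h]
      rw [hg]
      exact List.Perm.sum_eq (hp.map _)

lemma size_eq_log2_succ {m : Nat} (hm : m ≠ 0) : Nat.size m = m.log2 + 1 := by
  have h1 : Nat.size m ≤ m.log2 + 1 := Nat.size_le.mpr Nat.lt_log2_self
  have h2 : m.log2 < Nat.size m := Nat.lt_size.mpr (Nat.log2_self_le hm)
  omega

-- ---------- A side ----------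

def GoodDict (arr : List Int) (dp : PySem.Dict Int Int) (B : Int) : Prop :=
  dp.get? 0 = some 1 ∧ ∀ k val, dp.get? k = some val → k < B → 0 ≤ k ∧ val = fModel arr k.toNat

lemma GoodDict_mono {arr : List Int} {dp : PySem.Dict Int Int} {B B' : Int} (h : B' ≤ B)
    (hg : GoodDict arr dp B) : GoodDict arr dp B' :=
  ⟨hg.1, fun k val hk hlt => hg.2 k val hk (lt_of_lt_of_le hlt h)⟩

-- the body of A's inner loop as a function of the coin c
def hA (arr : List Int) (fuel : Nat) (m : Int) : PySem.Dict Int Int → Int → PySem.Dict Int Int :=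
  fun d c =>
    if c ≤ m then
      let old := d.getD m 0
      let r := recA arr fuel d (m - c)
      r.2.insert m (old + r.1)
    else d

lemma recA_loop (arr : List Int) (f : Nat) (m : Int) (hm : 1 ≤ m) (hf : m.toNat ≤ f)
    (IH : ∀ (m' : Int) (dp : PySem.Dict Int Int), 0 ≤ m' → m'.toNat < f →
      GoodDict arr dp (m' + 1) →
      (recA arr f dp m').1 = fModel arr m'.toNat
      ∧ GoodDict arr (recA arr f dp m').2 (m' + 1)
      ∧ ∀ k, m' < k → (recA arr f dp m').2.get? k = dp.get? k) :
    ∀ (cs : List Int) (d : PySem.Dict Int Int) (s : Int), (∀ c ∈ cs, 1 ≤ c) →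
      d.get? m = some s → GoodDict arr d m →
      (cs.foldl (hA arr f m) d).get? m = some (s + T arr m cs)
      ∧ GoodDict arr (cs.foldl (hA arr f m) d) m
      ∧ ∀ k, m < k → (cs.foldl (hA arr f m) d).get? k = d.get? k := by
  intro cs
  induction cs with
  | nil =>
    intro d s _ hdm hgd
    rw [List.foldl_nil, T_nil, add_zero]
    exact ⟨hdm, hgd, fun k _ => rfl⟩
  | cons c cs ih =>
    intro d s hcs hdm hgd
    have hc1 : 1 ≤ c := hcs c (by simp)
    by_cases hc : c ≤ m
    · -- the coin fires: one recursive call, then dp[m] += its value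
      have h0' : (0:Int) ≤ m - c := by omega
      have hlt : (m - c).toNat < f := by
        have h1 : (m - c).toNat < m.toNat := by omega
        omega
      have hgd' : GoodDict arr d (m - c + 1) := GoodDict_mono (by omega) hgd
      obtain ⟨hr1, hr2, hr3⟩ := IH (m - c) d h0' hlt hgd'
      have hold : d.getD m 0 = s := PySem.Dict.getD_of_get?_eq_some d 0 hdm
      have hstep : hA arr f m d c
          = (recA arr f d (m - c)).2.insert m (s + fModel arr (m - c).toNat) := by
        simp only [hA, if_pos hc, hold, hr1]
      have hm0 : (0:Int) ≠ m := by omega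
      -- the new dict is still good below m, holds the new partial sum at m,
      -- and is untouched above m
      have hget : (hA arr f m d c).get? m = some (s + fModel arr (m - c).toNat) := by
        rw [hstep]; exact PySem.Dict.get?_insert_self _ _ _
      have hgood : GoodDict arr (hA arr f m d c) m := by
        rw [hstep]
        refine ⟨?_, ?_⟩
        · rw [PySem.Dict.get?_insert_of_ne _ _ hm0]; exact hr2.1
        · intro k val hk hkm
          rw [PySem.Dict.get?_insert_of_ne _ _ (by omega : k ≠ m)] at hk
          by_cases hkc : k < m - c + 1
          · exact hr2.2 k val hk hkc
          · rw [hr3 k (by omega)] at hk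
            exact hgd.2 k val hk hkm
      have hpres : ∀ k, m < k → (hA arr f m d c).get? k = d.get? k := by
        intro k hk
        rw [hstep, PySem.Dict.get?_insert_of_ne _ _ (by omega : k ≠ m), hr3 k (by omega)]
      obtain ⟨ih1, ih2, ih3⟩ :=
        ih (hA arr f m d c) (s + fModel arr (m - c).toNat) (fun x hx => hcs x (by simp [hx]))
          hget hgood
      refine ⟨?_, ih2, ?_⟩
      · rw [List.foldl_cons, ih1, T_cons, if_pos hc, add_assoc]
      · intro k hk
        rw [List.foldl_cons, ih3 k hk, hpres k hk]
    · -- the coin is too big: nothing happens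
      have hskip : hA arr f m d c = d := by simp only [hA, if_neg hc]
      obtain ⟨ih1, ih2, ih3⟩ := ih d s (fun x hx => hcs x (by simp [hx])) hdm hgd
      refine ⟨?_, ?_, ?_⟩
      · rw [List.foldl_cons, hskip, ih1, T_cons, if_neg hc, zero_add]
      · rw [List.foldl_cons, hskip]; exact ih2
      · intro k hk; rw [List.foldl_cons, hskip]; exact ih3 k hk

lemma recA_spec (arr : List Int) (hv : ∀ v ∈ arr, 1 ≤ v) :
    ∀ (fuel : Nat) (m : Int) (dp : PySem.Dict Int Int), 0 ≤ m → m.toNat < fuel →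
      GoodDict arr dp (m + 1) →
      (recA arr fuel dp m).1 = fModel arr m.toNat
      ∧ GoodDict arr (recA arr fuel dp m).2 (m + 1)
      ∧ ∀ k, m < k → (recA arr fuel dp m).2.get? k = dp.get? k := by
  intro fuel
  induction fuel with
  | zero => intro m dp _ hf _; exact absurd hf (Nat.not_lt_zero _)
  | succ f ihf =>
    intro m dp h0 hf hg
    cases hdm : dp.get? m with
    | some val =>
      have hval : val = fModel arr m.toNat := (hg.2 m val hdm (by omega)).2
      simp only [recA, hdm]
      exact ⟨hval, hg, fun k _ => trivial⟩
    | none =>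
      have hm0 : m ≠ 0 := by
        intro h; rw [h, hg.1] at hdm; simp at hdm
      have hm1 : (1:Int) ≤ m := by omega
      have hmN : m.toNat ≠ 0 := by omega
      -- flatten the double loop
      have hflat :
          (List.range (m.toNat.log2 + 1)).foldl (fun d p =>
            arr.foldl (fun d v =>
              if 2 ^ p * v ≤ m then
                let old := d.getD m 0
                let r := recA arr f d (m - 2 ^ p * v)
                r.2.insert m (old + r.1)
              else d) d) (dp.insert m 0)
          = (coinList arr (m.toNat.log2 + 1)).foldl (hA arr f m) (dp.insert m 0) :=
        foldl_coinList (m.toNat.log2 + 1) arr (hA arr f m) (dp.insert m 0)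
      -- the starting dict for the loop
      have hdm1 : (dp.insert m 0).get? m = some 0 := PySem.Dict.get?_insert_self _ _ _
      have hg1 : GoodDict arr (dp.insert m 0) m := by
        refine ⟨?_, ?_⟩
        · rw [PySem.Dict.get?_insert_of_ne _ _ (by omega : (0:Int) ≠ m)]; exact hg.1
        · intro k val hk hkm
          rw [PySem.Dict.get?_insert_of_ne _ _ (by omega : k ≠ m)] at hk
          exact hg.2 k val hk (by omega)
      obtain ⟨hl1, hl2, hl3⟩ :=
        recA_loop arr f m hm1 (by omega) (fun m' dp' a b c => ihf m' dp' a b c)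
          (coinList arr (m.toNat.log2 + 1)) (dp.insert m 0) 0
          (mem_coinList hv) hdm1 hg1
      have hT : T arr m (coinList arr (m.toNat.log2 + 1)) = fModel arr m.toNat := by
        rw [fModel_eq_T hv hmN]
        rw [Int.toNat_of_nonneg h0]
      simp only [recA, hdm, hflat]
      refine ⟨?_, ?_, ?_⟩
      · rw [PySem.Dict.getD_of_get?_eq_some _ 0 hl1, zero_add, hT]
      · refine ⟨hl2.1, ?_⟩
        intro k val hk hkm
        by_cases hkm' : k < m
        · exact hl2.2 k val hk hkm'
        · have hkeq : k = m := by omega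
          subst hkeq
          rw [hl1] at hk
          refine ⟨h0, ?_⟩
          injection hk with hk'
          rw [← hk', zero_add, hT]
      · intro k hk
        rw [hl3 k hk, PySem.Dict.get?_insert_of_ne _ _ (by omega : k ≠ m)]

lemma solve_eq (n : Int) (arr : List Int) (hn : 0 ≤ n) (hv : ∀ v ∈ arr, 1 ≤ v) :
    solve n arr = fModel arr n.toNat := by
  have hperm : (PySem.List.sorted arr (fun x => x) false).Perm arr :=
    PySem.List.sorted_perm arr (fun x => x) false
  have hv' : ∀ v ∈ PySem.List.sorted arr (fun x => x) false, 1 ≤ v := by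
    intro v hvm; exact hv v (hperm.mem_iff.mp hvm)
  have hgood : GoodDict (PySem.List.sorted arr (fun x => x) false)
      ((PySem.Dict.empty).insert 0 1) (n + 1) := by
    refine ⟨PySem.Dict.get?_insert_self _ _ _, ?_⟩
    intro k val hk _
    rw [PySem.Dict.get?_insert] at hk
    by_cases hk0 : k = 0
    · subst hk0
      rw [if_pos rfl] at hk
      injection hk with hk'
      exact ⟨le_refl 0, by rw [← hk']; exact (fModel_zero _).symm⟩
    · rw [if_neg hk0, PySem.Dict.get?_empty] at hk
      simp at hk
  obtain ⟨h1, -, -⟩ :=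
    recA_spec (PySem.List.sorted arr (fun x => x) false) hv' (n.toNat + 1) n
      ((PySem.Dict.empty).insert 0 1) hn (by omega) hgood
  show (if n < 0 then 0
    else (recA (PySem.List.sorted arr (fun x => x) false) (n.toNat + 1)
      ((PySem.Dict.empty).insert 0 1) n).1) = fModel arr n.toNat
  rw [if_neg (not_lt.mpr hn), h1, fModel_perm hperm]

-- ---------- B side ----------

-- the body of B's inner loop as a function of the coin c
def gB (m : Nat) : List Int → Int → List Int :=
  fun dp c =>
    if c ≤ (m : Int) then
      dp.set m (dp.getD m 0 + dp.getD (((m : Int) - c).toNat) 0)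
    else dp

lemma altLoop (arr : List Int) (m N : Nat) (hm : 1 ≤ m) (hmN : m ≤ N) :
    ∀ (cs : List Int) (dpb : List Int) (s : Int), (∀ c ∈ cs, 1 ≤ c) →
      dpb.length = N + 1 → (∀ k, k < m → dpb.getD k 0 = fModel arr k) →
      cs.foldl (gB m) (dpb.set m s) = dpb.set m (s + T arr (m : Int) cs) := by
  intro cs
  induction cs with
  | nil =>
    intro dpb s _ _ _
    rw [List.foldl_nil, T_nil, add_zero]
  | cons c cs ih =>
    intro dpb s hcs hlen hlow
    have hc1 : 1 ≤ c := hcs c (by simp)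
    rw [List.foldl_cons]
    by_cases hc : c ≤ (m : Int)
    · have hmlt : m < dpb.length := by omega
      have hj : ((m : Int) - c).toNat < m := by omega
      -- reads: dp[m] is the partial sum s, dp[m-c] is the already-final fModel value
      have hread_m : (dpb.set m s).getD m 0 = s := by
        rw [List.getD_eq_getElem?_getD, List.getElem?_set, if_pos rfl, if_pos hmlt]
        rfl
      have hread_j : (dpb.set m s).getD (((m : Int) - c).toNat) 0
          = fModel arr (((m : Int) - c).toNat) := by
        rw [List.getD_eq_getElem?_getD, List.getElem?_set, if_neg (by omega),
          ← List.getD_eq_getElem?_getD]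
        exact hlow _ hj
      have hstep : gB m (dpb.set m s) c
          = dpb.set m (s + fModel arr (((m : Int) - c).toNat)) := by
        simp only [gB, if_pos hc, hread_m, hread_j, List.set_set]
      rw [hstep, ih dpb (s + fModel arr (((m : Int) - c).toNat))
        (fun x hx => hcs x (by simp [hx])) hlen hlow, T_cons, if_pos hc, add_assoc]
    · have hstep : gB m (dpb.set m s) c = dpb.set m s := by simp only [gB, if_neg hc]
      rw [hstep, ih dpb s (fun x hx => hcs x (by simp [hx])) hlen hlow, T_cons,
        if_neg hc, zero_add]

lemma altOuter (arr : List Int) (hv : ∀ v ∈ arr, 1 ≤ v) (N : Nat) :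
    ∀ (len t : Nat) (dp : List Int), 1 ≤ t → t + len = N + 1 → dp.length = N + 1 →
      (∀ k, k ≤ N → dp.getD k 0 = if k < t then fModel arr k else 0) →
      ∀ k, k ≤ N →
        ((List.range' t len).foldl (fun dp m =>
          (List.range (Nat.size m)).foldl (fun dp p =>
            arr.foldl (fun dp v =>
              if 2 ^ p * v ≤ (m : Int) then
                dp.set m (dp.getD m 0 + dp.getD ((m : Int) - 2 ^ p * v).toNat 0)
              else dp) dp) dp) dp).getD k 0 = fModel arr k := by
  intro len
  induction len with
  | zero =>
    intro t dp ht htl _ hInv k hk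
    rw [List.range'_zero, List.foldl_nil]
    rw [hInv k hk, if_pos (by omega)]
  | succ len ih =>
    intro t dp ht htl hlen hInv k hk
    rw [List.range'_succ, List.foldl_cons]
    have htN : t ≤ N := by omega
    have ht0 : t ≠ 0 := by omega
    -- flatten the inner double loop at m = t
    have hflat :
        (List.range (Nat.size t)).foldl (fun dp p =>
          arr.foldl (fun dp v =>
            if 2 ^ p * v ≤ (t : Int) then
              dp.set t (dp.getD t 0 + dp.getD ((t : Int) - 2 ^ p * v).toNat 0)
            else dp) dp) dp
        = (coinList arr (Nat.size t)).foldl (gB t) dp :=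
      foldl_coinList (Nat.size t) arr (gB t) dp
    have htlt : t < dp.length := by omega
    have hdp_t : dp.getD t 0 = 0 := by
      rw [hInv t htN, if_neg (lt_irrefl t)]
    have hset0 : dp.set t 0 = dp := by
      have := List.set_getElem_self htlt
      rw [← this]
      congr 1
      rw [← hdp_t, List.getD_eq_getElem?_getD, List.getElem?_eq_getElem htlt]
      rfl
    have hloop := altLoop arr t N ht htN (coinList arr (Nat.size t)) dp 0
      (mem_coinList hv) hlen (fun k hk => by rw [hInv k (by omega), if_pos (by omega)])
    have hT : (0 : Int) + T arr (t : Int) (coinList arr (Nat.size t)) = fModel arr t := by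
      rw [zero_add, size_eq_log2_succ ht0, ← fModel_eq_T hv ht0]
    have hloop2 : (coinList arr (Nat.size t)).foldl (gB t) dp = dp.set t (fModel arr t) := by
      conv_lhs => rw [← hset0]
      rw [hloop, hT]
    rw [hflat, hloop2]
    -- dp.set t (fModel t) satisfies the invariant at t+1
    apply ih (t + 1) (dp.set t (fModel arr t)) (by omega) (by omega)
      (by rw [List.length_set]; exact hlen) ?_ k hk
    intro k' hk'
    by_cases hkt : k' = t
    · subst hkt
      rw [List.getD_eq_getElem?_getD, List.getElem?_set, if_pos rfl, if_pos htlt]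
      simp
    · rw [List.getD_eq_getElem?_getD, List.getElem?_set, if_neg (fun h => hkt h.symm),
        ← List.getD_eq_getElem?_getD, hInv k' hk']
      by_cases h1 : k' < t
      · rw [if_pos h1, if_pos (by omega)]
      · rw [if_neg h1, if_neg (by omega)]

lemma solve_alt_eq (n : Int) (arr : List Int) (hn : 0 ≤ n) (hv : ∀ v ∈ arr, 1 ≤ v) :
    solve_alt n arr = fModel arr n.toNat := by
  have hlen : ((List.replicate (n.toNat + 1) (0:Int)).set 0 1).length = n.toNat + 1 := by
    rw [List.length_set, List.length_replicate]
  have hInv : ∀ k, k ≤ n.toNat →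
      ((List.replicate (n.toNat + 1) (0:Int)).set 0 1).getD k 0
        = if k < 1 then fModel arr k else 0 := by
    intro k hk
    by_cases hk0 : k = 0
    · subst hk0
      rw [List.getD_eq_getElem?_getD, List.getElem?_set, if_pos rfl,
        if_pos (by rw [List.length_replicate]; omega), if_pos (by omega), fModel_zero]
      rfl
    · rw [List.getD_eq_getElem?_getD, List.getElem?_set, if_neg (fun h => hk0 h.symm),
        List.getElem?_replicate, if_pos (by omega), if_neg (by omega)]
      rfl
  have h := altOuter arr hv n.toNat n.toNat 1
    ((List.replicate (n.toNat + 1) (0:Int)).set 0 1) (le_refl 1) (by omega) hlen hInv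
    n.toNat (le_refl _)
  show (if n < 0 then 0 else _) = fModel arr n.toNat
  rw [if_neg (not_lt.mpr hn)]
  exact h

-- ===== VERDICT (by name: the statement is the Claim_ definition above) =====
theorem solve_spec : Claim_equal_solve := by
  intro n arr _hdom hpre
  unfold Spec_solve
  obtain ⟨hn, hv⟩ := hpre
  rw [solve_eq n arr hn hv, solve_alt_eq n arr hn hv]
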